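-- pv_equiv track=rewrite | github.com/BlackChesire/PycharmProjects | Pre_finals/scartch.py | get_one_number
-- ===== SOURCE A (Python) =====
-- def get_one_number(numbers):
--     if len(numbers) == 0:
--         return None
--     if len(numbers) == 1:
--         return numbers[0]
--     rest = get_one_number(numbers[1:])
--     temp = rest
--     length = 0
--     while temp > 0:
--         temp //= 10
--         length += 1
--     return numbers[0] * (10 ** length) + rest
-- ===== SOURCE B (Python) =====
-- def get_one_number(numbers):
--     if not numbers:
--         return None
--     it = reversed(numbers)
--     res = next(it)
--     for x in it:
--         if res > 0:
--             # exact decimal digit count: bit_length estimate, then correct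
--             length = res.bit_length() * 30103 // 100000 + 1
--             while 10 ** length <= res:
--                 length += 1
--             while length > 1 and 10 ** (length - 1) > res:
--                 length -= 1
--         else:
--             length = 0
--         res = x * 10 ** length + res
--     return res
-- ===== Notes on version B (the rewrite author's own statement) =====
-- stated objective: faster
-- what changed: Replaces A's recursion over numbers[1:] slices and its per-digit //10 counting loop by one iterative backward fold that gets each digit count from bit_length() with a two-step correction.
import Mathlib
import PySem

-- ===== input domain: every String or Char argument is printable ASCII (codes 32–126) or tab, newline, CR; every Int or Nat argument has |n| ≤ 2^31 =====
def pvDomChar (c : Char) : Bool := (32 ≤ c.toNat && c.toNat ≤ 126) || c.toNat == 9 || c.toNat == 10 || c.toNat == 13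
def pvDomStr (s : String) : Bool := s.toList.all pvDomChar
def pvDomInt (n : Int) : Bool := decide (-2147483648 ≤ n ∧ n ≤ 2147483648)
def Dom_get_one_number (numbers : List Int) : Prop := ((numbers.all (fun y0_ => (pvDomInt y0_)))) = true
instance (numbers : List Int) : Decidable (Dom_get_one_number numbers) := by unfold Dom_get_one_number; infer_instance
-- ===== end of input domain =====

-- B replaces A's recursion over numbers[1:] slices and its per-digit //10 counting loop by one backward
-- iterative fold whose digit count comes from bit_length with a small correction; return value only.

-- ===== PORT A =====
-- A's inner 'while temp > 0: temp //= 10; length += 1' loop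
def pyDigitLen (t : Int) : Nat :=
  if h : t > 0 then pyDigitLen (PySem.Int.floordiv t 10) + 1 else 0
termination_by t.toNat
decreasing_by
  simp only [PySem.Int.floordiv]
  rw [Int.fdiv_eq_ediv]
  omega

def get_one_number : List Int → Option Int
  | [] => none                                   -- len == 0
  | [x] => some x                                -- len == 1
  | x :: y :: t =>
    match get_one_number (y :: t) with           -- rest = get_one_number(numbers[1:])
    | none => none                               -- unreachable: rest of a nonempty list is never None
    | some rest => some (x * 10 ^ pyDigitLen rest + rest)

-- ===== PORT B =====
-- Source B's 'while 10 ** length <= res: length += 1'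
def upLen (res : Int) (length : Nat) : Nat :=
  if h : (10 : Int) ^ length ≤ res then upLen res (length + 1) else length
termination_by res.toNat - length
decreasing_by
  have h1 : (length : Int) < 10 ^ length := by
    exact_mod_cast Nat.lt_pow_self (by norm_num) (n := length)
  omega

-- Source B's 'while length > 1 and 10 ** (length - 1) > res: length -= 1'
def downLen (res : Int) (length : Nat) : Nat :=
  if 1 < length ∧ res < (10 : Int) ^ (length - 1) then downLen res (length - 1) else length
termination_by length

-- Source B's digit-count computation: 0 unless res > 0, else bit_length estimate corrected by the two loops
def altDigitLen (res : Int) : Nat :=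
  if res > 0 then
    downLen res (upLen res ((Nat.log2 res.toNat + 1) * 30103 / 100000 + 1))
  else 0

def get_one_number_alt (numbers : List Int) : Option Int :=
  match numbers.reverse with
  | [] => none
  | r0 :: rest =>
    some (rest.foldl (fun res x => x * 10 ^ altDigitLen res + res) r0)

-- ===== PRECONDITION & SPEC =====
def Spec_get_one_number (numbers : List Int) (out : Option Int) : Prop := out = get_one_number_alt numbers
instance (numbers : List Int) (out : Option Int) : Decidable (Spec_get_one_number numbers out) := by unfold Spec_get_one_number; infer_instance

-- ===== CLAIM (what is proved, stated in full; the proofs are below) =====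
def Claim_equal_get_one_number : Prop := ∀ (numbers : List Int), Dom_get_one_number numbers → Spec_get_one_number numbers (get_one_number numbers)

-- ===== LEMMAS AND PROOFS =====

-- pyDigitLen of a positive number is its exact decimal digit count
theorem pyDigitLen_char (t : Int) (ht : 0 < t) :
    (10 : Int) ^ (pyDigitLen t - 1) ≤ t ∧ t < 10 ^ pyDigitLen t ∧ 1 ≤ pyDigitLen t := by
  induction t using pyDigitLen.induct with
  | case1 t h ih =>
    have hq : PySem.Int.floordiv t 10 = t / 10 := by
      simp [PySem.Int.floordiv, Int.fdiv_eq_ediv]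
    rw [pyDigitLen, dif_pos h, hq]
    rw [hq] at ih
    by_cases hq0 : 0 < t / 10
    · obtain ⟨h1, h2, h3⟩ := ih hq0
      have hdm := Int.ediv_add_emod t 10
      have hm1 := Int.emod_nonneg t (by norm_num : (10:Int) ≠ 0)
      have hm2 := Int.emod_lt_of_pos t (by norm_num : (0:Int) < 10)
      refine ⟨?_, ?_, by omega⟩
      · have heq : pyDigitLen (t / 10) + 1 - 1 = (pyDigitLen (t / 10) - 1) + 1 := by omega
        rw [heq, pow_succ]
        nlinarith
      · rw [pow_succ]
        nlinarith
    · have hz : pyDigitLen (t / 10) = 0 := by rw [pyDigitLen, dif_neg hq0]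
      have hlt : t < 10 := by
        have hdm := Int.ediv_add_emod t 10
        have hm2 := Int.emod_lt_of_pos t (by norm_num : (0:Int) < 10)
        omega
      rw [hz]
      simpa using ⟨ht, hlt⟩
  | case2 t h => omega

-- the decimal digit count is unique
theorem digit_unique (t : Int) (ht : 0 < t) (d e : Nat)
    (hd : (10 : Int) ^ (d - 1) ≤ t ∧ t < 10 ^ d ∧ 1 ≤ d)
    (he : (10 : Int) ^ (e - 1) ≤ t ∧ t < 10 ^ e ∧ 1 ≤ e) : d = e := by
  obtain ⟨hd1, hd2, hd3⟩ := hd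
  obtain ⟨he1, he2, he3⟩ := he
  by_contra hne
  rcases Nat.lt_or_lt_of_ne hne with hlt | hlt
  · have : (10 : Int) ^ d ≤ 10 ^ (e - 1) :=
      pow_le_pow_right₀ (by norm_num) (by omega)
    linarith
  · have : (10 : Int) ^ e ≤ 10 ^ (d - 1) :=
      pow_le_pow_right₀ (by norm_num) (by omega)
    linarith

-- the up loop returns L ≥ start with t < 10^L, and 10^(L-1) ≤ t unless it never stepped
theorem upLen_char (t : Int) : ∀ (l : Nat),
    t < 10 ^ upLen t l ∧ l ≤ upLen t l ∧ (upLen t l = l ∨ (10 : Int) ^ (upLen t l - 1) ≤ t) := by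
  intro l
  induction l using upLen.induct (res := t) with
  | case1 l h ih =>
    rw [upLen, dif_pos h]
    obtain ⟨i1, i2, i3⟩ := ih
    refine ⟨i1, by omega, ?_⟩
    rcases i3 with h3 | h3
    · right; rw [h3]; simpa using h
    · right; exact h3
  | case2 l h => rw [upLen, dif_neg h]; exact ⟨by omega, le_refl _, Or.inl rfl⟩

-- the down loop preserves t < 10^L and stops with 1 ≤ L and 10^(L-1) ≤ t (or L = 1)
theorem downLen_char (t : Int) : ∀ (l : Nat), 1 ≤ l → t < 10 ^ l →
    t < 10 ^ downLen t l ∧ 1 ≤ downLen t l ∧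
      ((10 : Int) ^ (downLen t l - 1) ≤ t ∨ downLen t l = 1) := by
  intro l
  induction l using downLen.induct (res := t) with
  | case1 l h ih =>
    intro _ _
    obtain ⟨h1, h2⟩ := h
    rw [downLen, if_pos ⟨h1, h2⟩]
    exact ih (by omega) h2
  | case2 l h =>
    intro hl hlt
    rw [downLen, if_neg h]
    push_neg at h
    refine ⟨hlt, hl, ?_⟩
    by_cases h1 : 1 < l
    · exact Or.inl (h h1)
    · exact Or.inr (by omega)

-- hence B's digit count equals A's
theorem altDigitLen_eq (t : Int) : altDigitLen t = pyDigitLen t := by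
  unfold altDigitLen
  by_cases ht : t > 0
  · rw [if_pos ht]
    set l0 := (Nat.log2 t.toNat + 1) * 30103 / 100000 + 1 with hl0
    have hu := upLen_char t l0
    obtain ⟨u1, u2, _⟩ := hu
    have hd := downLen_char t (upLen t l0) (by omega) u1
    obtain ⟨d1, d2, d3⟩ := hd
    have hd1 : (10 : Int) ^ (downLen t (upLen t l0) - 1) ≤ t := by
      rcases d3 with h | h
      · exact h
      · rw [h]; simpa using ht
    exact digit_unique t ht _ _ ⟨hd1, d1, d2⟩ (pyDigitLen_char t ht)
  · rw [if_neg ht, pyDigitLen, dif_neg ht]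

-- the concatenated value of a nonempty list, as a plain function
def catVal : List Int → Int
  | [] => 0
  | [x] => x
  | x :: t => x * 10 ^ pyDigitLen (catVal t) + catVal t

theorem getA_eq_catVal : ∀ (l : List Int), l ≠ [] → get_one_number l = some (catVal l)
  | [], h => absurd rfl h
  | [x], _ => rfl
  | x :: y :: t, _ => by
    simp only [get_one_number, getA_eq_catVal (y :: t) (by simp), catVal]

theorem foldl_eq_catVal : ∀ (rest l : List Int), l ≠ [] →
    rest.foldl (fun res x => x * 10 ^ pyDigitLen res + res) (catVal l)
      = catVal (rest.reverse ++ l)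
  | [], l, _ => by simp
  | x :: rest, l, hl => by
    have hstep : (fun res x => x * 10 ^ pyDigitLen res + res) (catVal l) x = catVal (x :: l) := by
      cases l with
      | nil => exact absurd rfl hl
      | cons a t => rfl
    simp only [List.foldl_cons, hstep]
    rw [foldl_eq_catVal rest (x :: l) (by simp)]
    simp

theorem getB_eq_catVal (l : List Int) (h : l ≠ []) : get_one_number_alt l = some (catVal l) := by
  unfold get_one_number_alt
  have hfun : (fun (res x : Int) => x * 10 ^ altDigitLen res + res)
      = fun res x => x * 10 ^ pyDigitLen res + res := by
    funext res x; rw [altDigitLen_eq]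
  cases hr : l.reverse with
  | nil => exact absurd (by simpa using congrArg List.reverse hr) h
  | cons r0 rest =>
    have h1 : rest.foldl (fun res x => x * 10 ^ pyDigitLen res + res) (catVal [r0])
        = catVal (rest.reverse ++ [r0]) := foldl_eq_catVal rest [r0] (by simp)
    have h2 : rest.reverse ++ [r0] = l := by
      have := congrArg List.reverse hr
      simpa using this.symm
    simp only [catVal] at h1
    dsimp only
    rw [hfun, h1, h2]

-- ===== VERDICT (by name: the statement is the Claim_ definition above) =====
theorem get_one_number_spec : Claim_equal_get_one_number := by
  intro numbers _
  unfold Spec_get_one_number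
  cases numbers with
  | nil => rfl
  | cons x t =>
    rw [getA_eq_catVal (x :: t) (by simp), getB_eq_catVal (x :: t) (by simp)]
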